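-- pv_equiv track=rewrite | github.com/arame002/Bacteria_postProcessor | bacteria_postProcessor.py | max_consecutive_below_threshold
-- ===== SOURCE A (Python) =====
-- def max_consecutive_below_threshold(arr, threshold):
--
--     consecutive_counts = 0
--     max_consecutive_counts = 0
--
--     for i in range(len(arr)):
--         if arr[i] < threshold:
--             consecutive_counts += 1
--             if consecutive_counts > max_consecutive_counts:
--                 max_consecutive_counts = consecutive_counts
--         else:
--             consecutive_counts = 0
--
--     return max_consecutive_counts
-- ===== SOURCE B (Python) =====
-- from itertools import groupby
--
-- def max_consecutive_below_threshold(arr, threshold):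
--     return max((sum(1 for _ in g) for below, g in groupby(x < threshold for x in arr) if below), default=0)
-- ===== Notes on version B (the rewrite author's own statement) =====
-- stated objective: idiomatic
-- what changed: Replaces the index loop with a running-counter/best pair by a partition-into-runs decomposition: groupby collapses consecutive equal truth values of x < threshold and the answer is the max length of a True run (default 0).
import Mathlib
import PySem

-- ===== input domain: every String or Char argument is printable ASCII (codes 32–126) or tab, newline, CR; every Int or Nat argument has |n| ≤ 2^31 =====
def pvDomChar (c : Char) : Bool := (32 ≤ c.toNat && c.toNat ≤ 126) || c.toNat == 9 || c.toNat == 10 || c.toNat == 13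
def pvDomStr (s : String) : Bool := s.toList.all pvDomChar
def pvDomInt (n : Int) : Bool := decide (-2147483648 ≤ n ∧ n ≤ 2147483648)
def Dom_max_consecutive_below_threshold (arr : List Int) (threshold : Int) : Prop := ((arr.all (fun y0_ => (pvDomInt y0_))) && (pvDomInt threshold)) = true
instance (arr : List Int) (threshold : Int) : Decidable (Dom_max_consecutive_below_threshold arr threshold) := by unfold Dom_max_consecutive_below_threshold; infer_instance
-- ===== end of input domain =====

-- B replaces A's running-counter/best-so-far loop by a partition-into-runs decomposition
-- (groupby on the x < threshold predicate, max run length with default 0); objective: idiomatic.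

-- ===== PORT A =====
-- for i in range(len(arr)): running pair (consecutive_counts, max_consecutive_counts)
def max_consecutive_below_threshold (arr : List Int) (threshold : Int) : Int :=
  (((PySem.List.pyRange 0 arr.length 1).foldl
    (fun (s : Int × Int) i =>
      if PySem.List.pyGetD arr i 0 < threshold then
        (s.1 + 1, if s.1 + 1 > s.2 then s.1 + 1 else s.2)
      else
        (0, s.2))
    (0, 0))).2

-- ===== PORT B =====
-- itertools.groupby over the booleans: lengths of the groups whose key is True
-- (a False group contributes nothing); max with default=0 is the fold of max over 0.
def pvRunLens : List Bool → List Int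
  | [] => []
  | b :: rest =>
    (if b then [(((b :: rest).takeWhile (fun x => x == b)).length : Int)] else []) ++
      pvRunLens ((b :: rest).dropWhile (fun x => x == b))
termination_by l => l.length
decreasing_by
  simp [List.dropWhile]
  exact List.length_dropWhile_le _ _

def max_consecutive_below_threshold_alt (arr : List Int) (threshold : Int) : Int :=
  (pvRunLens (arr.map (fun x => decide (x < threshold)))).foldl (fun a b => max a b) 0

-- ===== PRECONDITION & SPEC =====
def Spec_max_consecutive_below_threshold (arr : List Int) (threshold : Int) (out : Int) : Prop := out = max_consecutive_below_threshold_alt arr threshold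
instance (arr : List Int) (threshold : Int) (out : Int) : Decidable (Spec_max_consecutive_below_threshold arr threshold out) := by unfold Spec_max_consecutive_below_threshold; infer_instance

-- ===== CLAIM (what is proved, stated in full; the proofs are below) =====
def Claim_equal_max_consecutive_below_threshold : Prop := ∀ (arr : List Int) (threshold : Int), Dom_max_consecutive_below_threshold arr threshold → Spec_max_consecutive_below_threshold arr threshold (max_consecutive_below_threshold arr threshold)

-- ===== LEMMAS AND PROOFS =====

-- A's loop, restated over the boolean list (x < threshold) it inspects.
def pvF : Int → Int → List Bool → Int
  | _, m, [] => m
  | c, m, true :: bs => pvF (c + 1) (if c + 1 > m then c + 1 else m) bs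
  | _, m, false :: bs => pvF 0 m bs

-- best-run value with a carry c for the current run
def pvG : Int → List Bool → Int
  | c, [] => c
  | c, true :: bs => pvG (c + 1) bs
  | c, false :: bs => max c (pvG 0 bs)

theorem pvG_ge (bs : List Bool) : ∀ c : Int, c ≤ pvG c bs := by
  induction bs with
  | nil => intro c; simp [pvG]
  | cons b bs ih =>
    intro c
    cases b
    · exact le_max_left _ _
    · exact le_trans (by omega) (ih (c + 1))

theorem pvF_eq_max_pvG (bs : List Bool) :
    ∀ c m : Int, 0 ≤ c → c ≤ m → pvF c m bs = max m (pvG c bs) := by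
  induction bs with
  | nil => intro c m _ h; simp [pvF, pvG]; omega
  | cons b bs ih =>
    intro c m hc hcm
    cases b
    · show pvF 0 m bs = max m (max c (pvG 0 bs))
      rw [ih 0 m le_rfl (le_trans hc hcm)]
      have := pvG_ge bs (0 : Int)
      omega
    · show pvF (c + 1) (if c + 1 > m then c + 1 else m) bs = max m (pvG (c + 1) bs)
      rw [ih (c + 1) _ (by omega) (by split <;> omega)]
      have := pvG_ge bs (c + 1)
      split <;> omega

theorem foldl_max_shift (L : List Int) :
    ∀ a : Int, 0 ≤ a → L.foldl (fun x y => max x y) a = max a (L.foldl (fun x y => max x y) 0) := by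
  induction L with
  | nil => intro a ha; simp; omega
  | cons x L ih =>
    intro a ha
    show L.foldl (fun x y => max x y) (max a x)
        = max a (L.foldl (fun x y => max x y) (max 0 x))
    rw [ih (max a x) (by omega), ih (max 0 x) (by omega)]
    omega

theorem foldl_max_cons (L : List Int) (k : Int) :
    (k :: L).foldl (fun a b => max a b) 0 = max (max 0 k) (L.foldl (fun a b => max a b) 0) := by
  show L.foldl (fun a b => max a b) (max 0 k) = _
  rw [foldl_max_shift L (max 0 k) (by omega)]

theorem pvG_dropFalse (l : List Bool) :
    pvG 0 (l.dropWhile (fun x => x == false)) = pvG 0 l := by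
  induction l with
  | nil => rfl
  | cons b l ih =>
    cases b
    · rw [show (false :: l).dropWhile (fun x => x == false)
          = l.dropWhile (fun x => x == false) from by simp [List.dropWhile]]
      rw [ih, show pvG 0 (false :: l) = max 0 (pvG 0 l) from rfl]
      have := pvG_ge l (0 : Int)
      omega
    · simp [List.dropWhile]

theorem pvG_true_split (l : List Bool) :
    ∀ c : Int, 0 ≤ c →
      pvG c l = max (c + ((l.takeWhile (fun x => x == true)).length : Int))
        (pvG 0 (l.dropWhile (fun x => x == true))) := by
  induction l with
  | nil => intro c hc; simp [pvG]; omega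
  | cons b l ih =>
    intro c hc
    cases b
    · rw [show (false :: l).takeWhile (fun x => x == true) = [] from by simp [List.takeWhile],
        show (false :: l).dropWhile (fun x => x == true) = false :: l from by simp [List.dropWhile],
        show pvG c (false :: l) = max c (pvG 0 l) from rfl,
        show pvG 0 (false :: l) = max 0 (pvG 0 l) from rfl]
      have := pvG_ge l (0 : Int)
      simp
      omega
    · rw [show (true :: l).takeWhile (fun x => x == true)
            = true :: l.takeWhile (fun x => x == true) from by simp [List.takeWhile],
        show (true :: l).dropWhile (fun x => x == true)
            = l.dropWhile (fun x => x == true) from by simp [List.dropWhile],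
        show pvG c (true :: l) = pvG (c + 1) l from rfl,
        ih (c + 1) (by omega)]
      simp
      omega

theorem pvG_eq_runlens (l : List Bool) :
    pvG 0 l = (pvRunLens l).foldl (fun a b => max a b) 0 := by
  suffices H : ∀ n (l : List Bool), l.length ≤ n →
      pvG 0 l = (pvRunLens l).foldl (fun a b => max a b) 0 from H l.length l le_rfl
  intro n
  induction n with
  | zero =>
    intro l hl
    rw [show l = [] from List.eq_nil_of_length_eq_zero (by omega),
      show pvRunLens [] = [] from by rw [pvRunLens]]
    rfl
  | succ n ih =>
    intro l hl
    match l with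
    | [] => rw [show pvRunLens [] = [] from by rw [pvRunLens]]; rfl
    | false :: rest =>
      have hdrop : ((false :: rest).dropWhile (fun x => x == false)).length ≤ rest.length := by
        rw [show (false :: rest).dropWhile (fun x => x == false)
            = rest.dropWhile (fun x => x == false) from by simp [List.dropWhile]]
        exact List.length_dropWhile_le _ _
      rw [show pvRunLens (false :: rest)
          = pvRunLens ((false :: rest).dropWhile (fun x => x == false)) from by
        rw [pvRunLens]; simp]
      rw [← ih _ (by simp only [List.length_cons] at hl; omega), pvG_dropFalse]
    | true :: rest =>
      have hdrop : ((true :: rest).dropWhile (fun x => x == true)).length ≤ rest.length := by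
        rw [show (true :: rest).dropWhile (fun x => x == true)
            = rest.dropWhile (fun x => x == true) from by simp [List.dropWhile]]
        exact List.length_dropWhile_le _ _
      rw [show pvRunLens (true :: rest)
          = (((true :: rest).takeWhile (fun x => x == true)).length : Int)
              :: pvRunLens ((true :: rest).dropWhile (fun x => x == true)) from by
        rw [pvRunLens]; simp]
      rw [foldl_max_cons, ← ih _ (by simp only [List.length_cons] at hl; omega),
        pvG_true_split (true :: rest) 0 le_rfl]
      omega

theorem pvA_foldl_eq_pvF (t : Int) (arr : List Int) :
    ∀ c m : Int,
      (arr.foldl (fun (s : Int × Int) x =>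
          if x < t then (s.1 + 1, if s.1 + 1 > s.2 then s.1 + 1 else s.2)
          else (0, s.2)) (c, m)).2
        = pvF c m (arr.map (fun x => decide (x < t))) := by
  induction arr with
  | nil => intro c m; rfl
  | cons x arr ih =>
    intro c m
    show (arr.foldl (fun (s : Int × Int) x =>
          if x < t then (s.1 + 1, if s.1 + 1 > s.2 then s.1 + 1 else s.2)
          else (0, s.2))
        (if x < t then (c + 1, if c + 1 > m then c + 1 else m) else (0, m))).2
      = pvF c m (decide (x < t) :: arr.map (fun x => decide (x < t)))
    by_cases h : x < t
    · rw [if_pos h, show decide (x < t) = true from by simp [h],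
        show pvF c m (true :: arr.map (fun x => decide (x < t)))
          = pvF (c + 1) (if c + 1 > m then c + 1 else m)
              (arr.map (fun x => decide (x < t))) from rfl]
      exact ih _ _
    · rw [if_neg h, show decide (x < t) = false from by simp [h],
        show pvF c m (false :: arr.map (fun x => decide (x < t)))
          = pvF 0 m (arr.map (fun x => decide (x < t))) from rfl]
      exact ih _ _

-- ===== VERDICT (by name: the statement is the Claim_ definition above) =====
theorem max_consecutive_below_threshold_spec : Claim_equal_max_consecutive_below_threshold := by
  intro arr threshold _
  show _ = _
  unfold max_consecutive_below_threshold max_consecutive_below_threshold_alt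
  rw [PySem.List.foldl_pyRange_zero_pyGetD' arr 0
      (fun (s : Int × Int) x =>
        if x < threshold then (s.1 + 1, if s.1 + 1 > s.2 then s.1 + 1 else s.2) else (0, s.2))
      (0, 0),
    pvA_foldl_eq_pvF threshold arr 0 0,
    pvF_eq_max_pvG _ 0 0 le_rfl le_rfl, ← pvG_eq_runlens]
  have := pvG_ge (arr.map (fun x => decide (x < threshold))) (0 : Int)
  omega
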